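-- pv_equiv track=rewrite | github.com/bchwast/AGH-WDI | Kolokwia 19_20/kp_ex1.py | mag_mino
-- ===== SOURCE A (Python) =====
-- def nwd(a, b):
--     while b != 0:
--         b, a = a%b, b
--     #end while
--     return a
--
-- def mag_mino(tab):
--     n = len(tab)
--     for m1w in range(n):
--         for m1k1 in range(n-1):
--             for m2w1 in range(n-1):
--                 if m2w1 != m1w and m2w1+1 != m1w:
--                     for m2k in range(n):
--                         if m2k != m1k1 and m2k != m1k1+1:
--                             k_1 = tab[m1w][m1k1]
--                             k_2 = tab[m1w][m1k1+1]
--                             k_3 = tab[m2w1][m2k]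
--                             k_4 = tab[m2w1+1][m2k]
--                             if nwd(k_1, k_2) == nwd(k_1, k_3) == nwd(k_1, k_4) == nwd(k_2, k_3) == nwd(k_2, k_4) == nwd(k_3, k_4) == 1:
--                                 return True
--                     #end for
--             #end for
--         #end for
--     #end for
--     return False
-- ===== SOURCE B (Python) =====
-- def nwd(a, b):
--     while b != 0:
--         b, a = a%b, b
--     return a
--
-- def mag_mino(tab):
--     n = len(tab)
--     # encode each internally coprime adjacent pair by the PRODUCT of its two cells;
--     # coprimality is multiplicative, so one gcd of the two products replaces the
--     # four cross gcds of A's innermost test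
--     H = [(r, c, tab[r][c] * tab[r][c + 1]) for r in range(n) for c in range(n - 1)
--          if nwd(tab[r][c], tab[r][c + 1]) == 1]
--     V = [(r, c, tab[r][c] * tab[r + 1][c]) for r in range(n - 1) for c in range(n)
--          if nwd(tab[r][c], tab[r + 1][c]) == 1]
--     return any(nwd(hp, vp) == 1
--                for hr, hc, hp in H
--                for vr, vc, vp in V
--                if vr != hr and vr + 1 != hr and vc != hc and vc != hc + 1)
-- ===== Notes on version B (the rewrite author's own statement) =====
-- stated objective: faster
-- what changed: B encodes each internally coprime adjacent pair by the product of its two cells (collected in one grid scan) and decides the cross-coprimality of a horizontal and a vertical pair with a SINGLE gcd of the two products (coprimality is multiplicative), instead of A's four nested index loops each re-testing six pairwise gcds; only coprime pairs ever enter the cross phase, so on grids with few such pairs the quartic enumeration disappears.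
-- outside the precondition, e.g. on mag_mino([[1], [2]]): A returns False, B raises IndexError
import Mathlib
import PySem

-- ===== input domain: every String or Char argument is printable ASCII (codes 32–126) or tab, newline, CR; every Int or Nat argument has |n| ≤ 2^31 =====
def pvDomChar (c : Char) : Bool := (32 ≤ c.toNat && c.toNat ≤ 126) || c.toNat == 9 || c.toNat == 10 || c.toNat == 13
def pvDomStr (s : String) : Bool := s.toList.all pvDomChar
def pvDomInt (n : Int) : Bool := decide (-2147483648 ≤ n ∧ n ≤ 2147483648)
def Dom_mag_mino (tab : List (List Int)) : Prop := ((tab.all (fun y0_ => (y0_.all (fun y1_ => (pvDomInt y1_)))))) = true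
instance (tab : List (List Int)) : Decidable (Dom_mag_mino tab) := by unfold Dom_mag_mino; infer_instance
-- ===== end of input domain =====

-- B encodes each internally coprime adjacent pair by the product of its cells and decides
-- cross-coprimality with ONE gcd of the two products (coprimality is multiplicative),
-- instead of A's four nested index loops re-testing six pairwise gcds.

-- shared helper, used verbatim by both Pythons: nwd = Euclid's algorithm with Python's %
theorem pv_mod_natAbs_lt (a b : Int) (h : b ≠ 0) :
    (PySem.Int.mod a b).natAbs < b.natAbs := by
  rcases lt_or_gt_of_ne h with hb | hb
  · have := PySem.Int.mod_neg_bounds a hb; omega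
  · have h1 := PySem.Int.mod_nonneg a hb
    have h2 := PySem.Int.mod_lt a hb; omega

def nwd (a b : Int) : Int :=
  if h : b = 0 then a else nwd b (PySem.Int.mod a b)
termination_by b.natAbs
decreasing_by exact pv_mod_natAbs_lt a b h

-- tab[i][j]; under Pre_ every index used is in range, so the defaults are never reached
def cell (tab : List (List Int)) (i j : Int) : Int :=
  PySem.List.pyGetD (PySem.List.pyGetD tab i []) j 0

-- ===== PORT A =====
def mag_mino (tab : List (List Int)) : Bool :=
  let n : Int := tab.length
  (PySem.List.pyRange 0 n 1).any fun m1w =>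
    (PySem.List.pyRange 0 (n-1) 1).any fun m1k1 =>
      (PySem.List.pyRange 0 (n-1) 1).any fun m2w1 =>
        if m2w1 ≠ m1w ∧ m2w1 + 1 ≠ m1w then
          (PySem.List.pyRange 0 n 1).any fun m2k =>
            if m2k ≠ m1k1 ∧ m2k ≠ m1k1 + 1 then
              let k1 := cell tab m1w m1k1
              let k2 := cell tab m1w (m1k1 + 1)
              let k3 := cell tab m2w1 m2k
              let k4 := cell tab (m2w1 + 1) m2k
              decide (nwd k1 k2 = nwd k1 k3 ∧ nwd k1 k3 = nwd k1 k4 ∧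
                      nwd k1 k4 = nwd k2 k3 ∧ nwd k2 k3 = nwd k2 k4 ∧
                      nwd k2 k4 = nwd k3 k4 ∧ nwd k3 k4 = 1)
            else false
        else false

-- ===== PORT B =====
def mag_mino_alt (tab : List (List Int)) : Bool :=
  let n : Int := tab.length
  let H : List (Int × Int × Int) :=
    (PySem.List.pyRange 0 n 1).flatMap fun r =>
      (PySem.List.pyRange 0 (n-1) 1).filterMap fun c =>
        if nwd (cell tab r c) (cell tab r (c+1)) = 1
        then some (r, c, cell tab r c * cell tab r (c+1)) else none
  let V : List (Int × Int × Int) :=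
    (PySem.List.pyRange 0 (n-1) 1).flatMap fun r =>
      (PySem.List.pyRange 0 n 1).filterMap fun c =>
        if nwd (cell tab r c) (cell tab (r+1) c) = 1
        then some (r, c, cell tab r c * cell tab (r+1) c) else none
  H.any fun h =>
    V.any fun v =>
      if v.1 = h.1 ∨ v.1 + 1 = h.1 ∨ v.2.1 = h.2.1 ∨ v.2.1 = h.2.1 + 1 then false
      else decide (nwd h.2.2 v.2.2 = 1)

-- ===== PRECONDITION & SPEC =====
-- Pre_ excludes grids having a row shorter than the number of rows: there the Python A raises
-- IndexError whenever its index loops reach the short row (and B raises during its pre-scan);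
-- A's False on the tiny ragged grids (n ≤ 2) whose loops never index anything is vacuous.
def Pre_mag_mino (tab : List (List Int)) : Prop :=
  ∀ row ∈ tab, tab.length ≤ row.length
instance (tab : List (List Int)) : Decidable (Pre_mag_mino tab) := by
  unfold Pre_mag_mino; infer_instance
def pvWitness_mag_mino : List (List Int) := [[1, 2, 3], [4, 5, 6], [7, 8, 9]]

def Spec_mag_mino (tab : List (List Int)) (out : Bool) : Prop := out = mag_mino_alt tab
instance (tab : List (List Int)) (out : Bool) : Decidable (Spec_mag_mino tab out) := by
  unfold Spec_mag_mino; infer_instance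

-- ===== CLAIM (what is proved, stated in full; the proofs are below) =====
def Claim_equal_mag_mino : Prop := ∀ (tab : List (List Int)), Dom_mag_mino tab → Pre_mag_mino tab → Spec_mag_mino tab (mag_mino tab)

-- ===== LEMMAS AND PROOFS =====

-- nwd closed form: the gcd carrying the sign of the second argument (Python's % has the
-- divisor's sign), and the first argument itself when the second is 0.
theorem nwd_eq (x y : Int) :
    nwd x y = if 0 < y then (Int.gcd x y : Int)
              else if y < 0 then -(Int.gcd x y : Int) else x := by
  fun_induction nwd x y with
  | case1 a => simp
  | case2 a b hb ih =>
    rw [ih]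
    have h0 := PySem.Int.floordiv_mul_add_mod a b
    have hg : Int.gcd b (PySem.Int.mod a b) = Int.gcd a b := by
      have hmod : PySem.Int.mod a b = a + b * -(PySem.Int.floordiv a b) := by
        linear_combination h0
      rw [hmod, Int.gcd_add_mul_left_right, Int.gcd_comm]
    rcases lt_trichotomy b 0 with hbneg | hb0 | hbpos
    · have hbounds := PySem.Int.mod_neg_bounds a hbneg
      rcases eq_or_lt_of_le hbounds.2 with hm0 | hmneg
      · have hdvd : b ∣ a := (PySem.Int.mod_eq_zero_iff_dvd a b).mp hm0
        have hgb : Int.gcd a b = b.natAbs := Int.gcd_eq_natAbs_right_iff_dvd.mpr hdvd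
        rw [hm0, if_neg (by omega), if_neg (by omega), if_neg (by omega), if_pos hbneg, hgb]
        omega
      · rw [if_neg (by omega), if_pos hmneg, if_neg (by omega), if_pos hbneg, hg]
    · exact absurd hb0 hb
    · have h1 := PySem.Int.mod_nonneg a hbpos
      have h2 := PySem.Int.mod_lt a hbpos
      rcases eq_or_lt_of_le h1 with hm0 | hmpos
      · have hdvd : b ∣ a := (PySem.Int.mod_eq_zero_iff_dvd a b).mp hm0.symm
        have hgb : Int.gcd a b = b.natAbs := Int.gcd_eq_natAbs_right_iff_dvd.mpr hdvd
        rw [← hm0, if_neg (by omega), if_neg (by omega), if_pos hbpos, hgb]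
        omega
      · rw [if_pos hmpos, if_pos hbpos, hg]

-- nwd x y == 1 characterised without the recursion
theorem nwd_one_iff (x y : Int) :
    nwd x y = 1 ↔ (0 < y ∧ Int.gcd x y = 1) ∨ (y = 0 ∧ x = 1) := by
  rw [nwd_eq]
  rcases lt_trichotomy y 0 with h | h | h
  · rw [if_neg (by omega), if_pos h]
    constructor
    · intro hc; exfalso; omega
    · rintro (⟨h1, _⟩ | ⟨h1, _⟩) <;> omega
  · subst h; simp
  · rw [if_pos h]
    constructor
    · intro hc; left; exact ⟨h, by exact_mod_cast hc⟩
    · rintro (⟨_, h1⟩ | ⟨h1, _⟩); · exact_mod_cast h1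
      · omega

-- coprimality is multiplicative: one gcd of the products decides the four cross gcds
theorem gcd_mul_mul_eq_one (a b c d : Int) :
    Int.gcd (a * b) (c * d) = 1 ↔
      Int.gcd a c = 1 ∧ Int.gcd a d = 1 ∧ Int.gcd b c = 1 ∧ Int.gcd b d = 1 := by
  simp only [Int.gcd, Int.natAbs_mul, ← Nat.coprime_iff_gcd_eq_one,
    Nat.coprime_mul_iff_left, Nat.coprime_mul_iff_right]
  tauto

-- A's six-gcd chain equals B's three-condition test
theorem chain_iff (a b c d : Int) :
    (nwd a b = 1 ∧ nwd a c = 1 ∧ nwd a d = 1 ∧ nwd b c = 1 ∧ nwd b d = 1 ∧ nwd c d = 1)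
    ↔ (nwd a b = 1 ∧ nwd c d = 1 ∧ nwd (a * b) (c * d) = 1) := by
  simp only [nwd_one_iff, gcd_mul_mul_eq_one]
  constructor
  · rintro ⟨hab, hac, had, hbc, hbd, hcd⟩
    refine ⟨hab, hcd, ?_⟩
    rcases hac with ⟨hc, gac⟩ | ⟨hc0, ha1⟩
    · -- c > 0
      rcases had with ⟨hd, gad⟩ | ⟨hd0, ha1⟩
      · -- d > 0 : product positive, four cross gcds
        left
        refine ⟨by positivity, gac, gad, ?_, ?_⟩
        · rcases hbc with ⟨_, g⟩ | ⟨h0, _⟩; · exact g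
          · omega
        · rcases hbd with ⟨_, g⟩ | ⟨h0, _⟩; · exact g
          · omega
      · -- d = 0 : a = b = 1 forced
        subst hd0
        have hb1 : b = 1 := by
          rcases hbd with ⟨h0, _⟩ | ⟨_, h1⟩; · omega
          · exact h1
        subst ha1; subst hb1; right; simp
    · -- c = 0 : a = 1, b = 1, d = 1
      subst hc0
      have hb1 : b = 1 := by
        rcases hbc with ⟨h0, _⟩ | ⟨_, h1⟩; · omega
        · exact h1
      subst ha1; subst hb1
      rcases hcd with ⟨hd, gd⟩ | ⟨_, h01⟩
      · have : d.natAbs = 1 := by simpa [Int.gcd] using gd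
        have hd1 : d = 1 := by omega
        subst hd1; right; simp
      · omega
  · rintro ⟨hab, hcd, hprod⟩
    rcases hprod with ⟨hpos, gac, gad, gbc, gbd⟩ | ⟨hcd0, hab1⟩
    · -- c*d > 0; with nwd c d = 1 this forces 0 < d, hence 0 < c
      have hd : 0 < d := by
        rcases hcd with ⟨h, _⟩ | ⟨h0, _⟩; · exact h
        · subst h0; simp at hpos
      have hc : 0 < c := by
        by_contra h
        rcases lt_or_eq_of_le (not_lt.mp h) with h' | h'
        · nlinarith
        · subst h'; simp at hpos
      exact ⟨hab, Or.inl ⟨hc, gac⟩, Or.inl ⟨hd, gad⟩,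
             Or.inl ⟨hc, gbc⟩, Or.inl ⟨hd, gbd⟩, hcd⟩
    · -- c*d = 0 and a*b = 1; nwd a b = 1 rules out a = b = -1, so a = b = 1
      have hab11 : a = 1 ∧ b = 1 := by
        rcases Int.mul_eq_one_iff_eq_one_or_neg_one.mp hab1 with h | h
        · exact h
        · exfalso
          rcases hab with ⟨h0, _⟩ | ⟨h0, _⟩ <;> omega
      obtain ⟨ha1, hb1⟩ := hab11
      subst ha1; subst hb1
      rcases hcd with ⟨hd, gd⟩ | ⟨hd0, hc1⟩
      · -- d > 0; c*d = 0 forces c = 0, then gcd c d = d = 1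
        have hc0 : c = 0 := by
          rcases mul_eq_zero.mp hcd0 with h | h; · exact h
          · omega
        subst hc0
        have : d.natAbs = 1 := by simpa [Int.gcd] using gd
        refine ⟨Or.inl ⟨by norm_num, by simp⟩, Or.inr ⟨rfl, rfl⟩,
                Or.inl ⟨hd, by simp [Int.gcd, this]⟩,
                Or.inr ⟨rfl, rfl⟩, Or.inl ⟨hd, by simp [Int.gcd, this]⟩,
                Or.inl ⟨hd, by simp [Int.gcd, this]⟩⟩
      · subst hd0; subst hc1
        exact ⟨Or.inl ⟨by norm_num, by simp⟩, Or.inl ⟨by norm_num, by simp⟩,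
               Or.inr ⟨rfl, rfl⟩, Or.inl ⟨by norm_num, by simp⟩,
               Or.inr ⟨rfl, rfl⟩, Or.inr ⟨rfl, rfl⟩⟩

-- Both ports are existence checks for the same configuration: A's chained equality
-- "g12 = g13 = … = g34 = 1" says all six gcds are 1, which by chain_iff is exactly
-- B's three conditions (the two internal tests plus one gcd of the two products).
theorem mag_mino_eq_alt (tab : List (List Int)) : mag_mino tab = mag_mino_alt tab := by
  unfold mag_mino mag_mino_alt
  rw [Bool.eq_iff_iff]
  simp only [List.any_eq_true, List.mem_flatMap, List.mem_filterMap,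
    PySem.List.mem_pyRange_one, Bool.if_false_right, Bool.and_eq_true,
    decide_eq_true_eq]
  constructor
  · rintro ⟨w1, hw1, k1, hk1, w2, hw2, ⟨hg1a, hg1b⟩, m2k, hm2k, ⟨hg2a, hg2b⟩,
      e1, e2, e3, e4, e5, e6⟩
    have x34 := e6
    have x24 := e5.trans x34
    have x23 := e4.trans x24
    have x14 := e3.trans x23
    have x13 := e2.trans x14
    have x12 := e1.trans x13
    obtain ⟨-, -, xprod⟩ := (chain_iff (cell tab w1 k1) (cell tab w1 (k1+1))
        (cell tab w2 m2k) (cell tab (w2+1) m2k)).mp ⟨x12, x13, x14, x23, x24, x34⟩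
    refine ⟨(w1, k1, cell tab w1 k1 * cell tab w1 (k1+1)),
            ⟨w1, hw1, k1, hk1, by rw [if_pos x12]⟩,
            (w2, m2k, cell tab w2 m2k * cell tab (w2+1) m2k),
            ⟨w2, hw2, m2k, hm2k, by rw [if_pos x34]⟩, ?_⟩
    rw [if_neg (by simp only [not_or]; exact ⟨hg1a, hg1b, hg2a, hg2b⟩)]
    exact decide_eq_true_eq.mpr xprod
  · rintro ⟨hp, ⟨r1, hr1, c1, hc1, hH⟩, vp, ⟨r2, hr2, c2, hc2, hV⟩, hcheck⟩
    split_ifs at hH with h12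
    · injection hH with hH; subst hH
      split_ifs at hV with h34
      · injection hV with hV; subst hV
        split_ifs at hcheck with hguard
        simp only [not_or] at hguard
        obtain ⟨g1, g2, g3, g4⟩ := hguard
        simp only [decide_eq_true_eq] at hcheck
        obtain ⟨x12, x13, x14, x23, x24, x34⟩ := (chain_iff (cell tab r1 c1)
            (cell tab r1 (c1+1)) (cell tab r2 c2) (cell tab (r2+1) c2)).mpr
            ⟨h12, h34, hcheck⟩
        exact ⟨r1, hr1, c1, hc1, r2, hr2, ⟨g1, g2⟩, c2, hc2, ⟨g3, g4⟩,
          by rw [x12, x13], by rw [x13, x14], by rw [x14, x23],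
          by rw [x23, x24], by rw [x24, x34], x34⟩

-- ===== VERDICT (by name: the statement is the Claim_ definition above) =====
theorem mag_mino_spec : Claim_equal_mag_mino := by
  intro tab _ _
  exact mag_mino_eq_alt tab
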